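-- pv_equiv track=rewrite | github.com/nguyenxuanhoa493/hoctuvungcha_bot | bot/handlers/typing.py | _word_hint_with_reveals
-- ===== SOURCE A (Python) =====
-- def _word_hint_with_reveals(word: str, revealed: set) -> str:
--     """Show revealed chars, replace rest with _. Multi-word separated by 3 spaces."""
--     parts = word.split(" ")
--     result_parts = []
--     idx = 0
--     for part in parts:
--         chars = []
--         for ch in part:
--             chars.append(ch if idx in revealed else "_")
--             idx += 1
--         result_parts.append(" ".join(chars))
--     return "   ".join(result_parts)
-- ===== SOURCE B (Python) =====
-- def _word_hint_with_reveals(word: str, revealed: set) -> str: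
--     """Single left-to-right scan over the characters; no split()."""
--     parts = []
--     cur = []
--     idx = 0
--     for ch in word:
--         if ch == " ":
--             parts.append(" ".join(cur))
--             cur = []
--         else:
--             cur.append(ch if idx in revealed else "_")
--             idx += 1
--     parts.append(" ".join(cur))
--     return "   ".join(parts)
-- ===== Notes on version B (the rewrite author's own statement) =====
-- stated objective: alternative
-- what changed: Replaces split-into-words-then-nested-loops with a single character-by-character scan that maintains a running non-space index, the current word's masked characters, and the list of finished word hints.
import Mathlib
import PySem

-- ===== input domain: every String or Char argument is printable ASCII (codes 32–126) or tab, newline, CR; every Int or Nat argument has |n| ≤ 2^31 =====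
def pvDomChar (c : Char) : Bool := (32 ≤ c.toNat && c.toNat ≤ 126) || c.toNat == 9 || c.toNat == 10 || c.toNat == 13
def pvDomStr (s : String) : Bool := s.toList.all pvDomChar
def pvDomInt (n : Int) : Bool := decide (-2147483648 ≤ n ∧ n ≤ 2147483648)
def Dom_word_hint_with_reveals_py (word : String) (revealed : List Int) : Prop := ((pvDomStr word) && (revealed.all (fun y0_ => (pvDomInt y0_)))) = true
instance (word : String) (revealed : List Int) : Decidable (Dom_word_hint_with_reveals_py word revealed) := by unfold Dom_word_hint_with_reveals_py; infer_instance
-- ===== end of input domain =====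

-- B replaces word.split(" ") + nested loops by one character scan with a running
-- non-space index and an explicit current-word accumulator (alternative decomposition, same cost).


-- ===== PORT A =====
-- inner loop body: chars.append(ch if idx in revealed else "_"); idx += 1
def aInnerStep (revealed : List Int) (st : List (List Char) × Int) (ch : Char) : List (List Char) × Int :=
  (st.1 ++ [if revealed.contains st.2 then [ch] else ['_']], st.2 + 1)

-- outer loop body: run the inner loop over the part, then result_parts.append(" ".join(chars))
def aOuterStep (revealed : List Int) (st : List (List Char) × Int) (part : List Char) : List (List Char) × Int :=
  let inner := part.foldl (aInnerStep revealed) ([], st.2)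
  (st.1 ++ [PySem.Chars.join [' '] inner.1], inner.2)

def word_hint_with_reveals_py (word : String) (revealed : List Int) : String :=
  String.ofList (PySem.Chars.join [' ', ' ', ' ']
    ((PySem.Chars.splitOn word.toList [' ']).foldl (aOuterStep revealed) ([], 0)).1)

-- ===== PORT B =====
-- single scan: on ' ' flush the current word's reprs, otherwise mask/reveal and bump idx
def altGo (revealed : List Int) : List Char → Int → List (List Char) → List (List Char) → List Char
  | [], _, cur, parts => PySem.Chars.join [' ', ' ', ' '] (parts ++ [PySem.Chars.join [' '] cur])
  | c :: cs, idx, cur, parts =>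
    if c = ' ' then
      altGo revealed cs idx [] (parts ++ [PySem.Chars.join [' '] cur])
    else
      altGo revealed cs (idx + 1) (cur ++ [if revealed.contains idx then [c] else ['_']]) parts

def word_hint_with_reveals_py_alt (word : String) (revealed : List Int) : String :=
  String.ofList (altGo revealed word.toList 0 [] [])

-- ===== PRECONDITION & SPEC =====
def Spec_word_hint_with_reveals_py (word : String) (revealed : List Int) (out : String) : Prop := out = word_hint_with_reveals_py_alt word revealed
instance (word : String) (revealed : List Int) (out : String) : Decidable (Spec_word_hint_with_reveals_py word revealed out) := by unfold Spec_word_hint_with_reveals_py; infer_instance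

-- ===== CLAIM (what is proved, stated in full; the proofs are below) =====
def Claim_equal_word_hint_with_reveals_py : Prop := ∀ (word : String) (revealed : List Int), Dom_word_hint_with_reveals_py word revealed → Spec_word_hint_with_reveals_py word revealed (word_hint_with_reveals_py word revealed)

-- ===== LEMMAS AND PROOFS =====

-- specification of splitOn on the single-space separator, with reversed-char accumulator
def spWith : List Char → List Char → List (List Char)
  | cur, [] => [cur.reverse]
  | cur, c :: cs => if c = ' ' then cur.reverse :: spWith [] cs else spWith (c :: cur) cs

-- reprs produced by A's inner loop starting at idx
def reprList (revealed : List Int) (idx : Int) : List Char → List (List Char)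
  | [] => []
  | c :: cs => (if revealed.contains idx then [c] else ['_']) :: reprList revealed (idx + 1) cs

-- A's outer loop as a pure function of the parts list and the starting index
def aParts (revealed : List Int) : List (List Char) → Int → List (List Char)
  | [], _ => []
  | p :: ps, idx =>
      PySem.Chars.join [' '] (reprList revealed idx p) :: aParts revealed ps (idx + (p.length : Int))

def consHead (x : List Char) : List (List Char) → List (List Char)
  | [] => [x]
  | p :: ps => (x ++ p) :: ps

-- what altGo still has to produce for the remaining chars, given the current word's reprs
def headApp (revealed : List Int) (cur : List (List Char)) (idx : Int) : List (List Char) → List (List Char)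
  | [] => [PySem.Chars.join [' '] cur]
  | p :: ps =>
      PySem.Chars.join [' '] (cur ++ reprList revealed idx p) :: aParts revealed ps (idx + (p.length : Int))

lemma go_spec (fuel : Nat) : ∀ (l cur : List Char) (acc : List (List Char)), l.length < fuel →
    PySem.Chars.splitOn.go [' '] fuel l cur acc = acc.reverse ++ spWith cur l := by
  induction fuel with
  | zero => intro l cur acc h; omega
  | succ f ih =>
    intro l cur acc h
    cases l with
    | nil => simp [PySem.Chars.splitOn.go, spWith]
    | cons c rest =>
      by_cases hc : c = ' '
      · subst hc
        simp only [PySem.Chars.splitOn.go, List.isPrefixOf, BEq.rfl, Bool.true_and,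
          if_true, List.length_cons, List.drop_succ_cons, List.length_nil, List.drop_zero]
        rw [ih rest [] (cur.reverse :: acc) (by simp at h ⊢; omega)]
        simp [spWith]
      · have hpre : [' '].isPrefixOf (c :: rest) = false := by
          simp [List.isPrefixOf]; exact fun h' => hc h'.symm
        simp only [PySem.Chars.splitOn.go, hpre, Bool.false_eq_true, if_false]
        rw [ih rest (c :: cur) acc (by simp at h ⊢; omega)]
        simp [spWith, hc]

lemma splitOn_eq (s : List Char) : PySem.Chars.splitOn s [' '] = spWith [] s := by
  unfold PySem.Chars.splitOn
  rw [go_spec (s.length + 1) s [] [] (by omega)]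
  simp

lemma consHead_consHead (x y : List Char) (l : List (List Char)) :
    consHead x (consHead y l) = consHead (x ++ y) l := by
  cases l <;> simp [consHead]

lemma spWith_acc (cs : List Char) : ∀ (a : List Char),
    spWith a cs = consHead a.reverse (spWith [] cs) := by
  induction cs with
  | nil => intro a; simp [spWith, consHead]
  | cons c cs ih =>
    intro a
    by_cases hc : c = ' '
    · subst hc; simp [spWith, consHead]
    · simp only [spWith, hc, if_false]
      rw [ih (c :: a), ih [c], consHead_consHead]
      simp

lemma spWith_ne_nil (cs : List Char) : ∀ (a : List Char), spWith a cs ≠ [] := by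
  induction cs with
  | nil => intro a; simp [spWith]
  | cons c cs ih =>
    intro a
    by_cases hc : c = ' '
    · simp [spWith, hc]
    · simpa [spWith, hc] using ih (c :: a)

lemma headApp_nil_cur (revealed : List Int) (idx : Int) (l : List (List Char)) (hl : l ≠ []) :
    headApp revealed [] idx l = aParts revealed l idx := by
  cases l with
  | nil => exact absurd rfl hl
  | cons p ps => simp [headApp, aParts]

lemma inner_foldl (revealed : List Int) (p : List Char) : ∀ (acc : List (List Char)) (idx : Int),
    p.foldl (aInnerStep revealed) (acc, idx) = (acc ++ reprList revealed idx p, idx + (p.length : Int)) := by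
  induction p with
  | nil => intro acc idx; simp [reprList]
  | cons c cs ih =>
    intro acc idx
    simp only [List.foldl_cons, aInnerStep, ih, reprList, List.length_cons, Prod.mk.injEq]
    constructor
    · simp
    · push_cast; ring

lemma outer_foldl (revealed : List Int) (parts : List (List Char)) :
    ∀ (acc : List (List Char)) (idx : Int),
    (parts.foldl (aOuterStep revealed) (acc, idx)).1 = acc ++ aParts revealed parts idx := by
  induction parts with
  | nil => intro acc idx; simp [aParts]
  | cons p ps ih =>
    intro acc idx
    simp only [List.foldl_cons, aOuterStep, inner_foldl, List.nil_append, ih, aParts]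
    simp

lemma headApp_consHead (revealed : List Int) (cur : List (List Char)) (idx : Int) (c : Char)
    (l : List (List Char)) (hl : l ≠ []) :
    headApp revealed cur idx (consHead [c] l)
      = headApp revealed (cur ++ [if revealed.contains idx then [c] else ['_']]) (idx + 1) l := by
  cases l with
  | nil => exact absurd rfl hl
  | cons p ps =>
    simp only [consHead, List.singleton_append, headApp, reprList, List.length_cons]
    congr 1
    · simp
    · congr 1; push_cast; ring

lemma altGo_spec (revealed : List Int) (cs : List Char) :
    ∀ (idx : Int) (cur parts : List (List Char)),
    altGo revealed cs idx cur parts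
      = PySem.Chars.join [' ', ' ', ' '] (parts ++ headApp revealed cur idx (spWith [] cs)) := by
  induction cs with
  | nil => intro idx cur parts; simp [altGo, spWith, headApp, reprList, aParts]
  | cons c cs ih =>
    intro idx cur parts
    by_cases hc : c = ' '
    · subst hc
      simp only [altGo, if_true, ih]
      rw [headApp_nil_cur revealed idx _ (spWith_ne_nil cs [])]
      simp only [spWith, List.reverse_nil]
      cases h : spWith [] cs with
      | nil => exact absurd h (spWith_ne_nil cs [])
      | cons p ps =>
        simp [headApp, aParts, reprList]
    · simp only [altGo, hc, if_false, ih]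
      have h1 : spWith [] (c :: cs) = consHead [c] (spWith [] cs) := by
        simp only [spWith, hc, if_false]
        rw [spWith_acc]
        simp
      rw [h1, headApp_consHead revealed cur idx c _ (spWith_ne_nil cs [])]

-- ===== VERDICT (by name: the statement is the Claim_ definition above) =====
theorem word_hint_with_reveals_py_spec : Claim_equal_word_hint_with_reveals_py := by
  intro word revealed _
  unfold Spec_word_hint_with_reveals_py word_hint_with_reveals_py word_hint_with_reveals_py_alt
  rw [splitOn_eq, outer_foldl, altGo_spec,
    headApp_nil_cur revealed 0 _ (spWith_ne_nil word.toList [])]
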